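-- pv_equiv track=rewrite | github.com/NiChloride/RDT-4.0 | rdt3.py | __IntChksum
-- ===== SOURCE A (Python) =====
-- def __IntChksum(byte_msg):
-- 	"""Implement the Internet Checksum algorithm
--
-- 	Input argument: the bytes message object
-- 	Return  -> 16-bit checksum value
-- 	Note: it does not check whether the input object is a bytes object
-- 	"""
-- 	total = 0
-- 	length = len(byte_msg)	#length of the byte message object
-- 	i = 0
-- 	while length > 1:
-- 		total += ((byte_msg[i+1] << 8) & 0xFF00) + ((byte_msg[i]) & 0xFF)
-- 		i += 2
-- 		length -= 2
--
-- 	if length > 0: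
-- 		total += (byte_msg[i] & 0xFF)
--
-- 	while (total >> 16) > 0:
-- 		total = (total & 0xFFFF) + (total >> 16)
--
-- 	total = ~total
--
-- 	return total & 0xFFFF
-- ===== SOURCE B (Python) =====
-- def __IntChksum(byte_msg):
-- 	"""Internet checksum via two strided-slice sums instead of a word-building loop."""
-- 	low = sum(b & 0xFF for b in byte_msg[0::2])
-- 	high = sum(b & 0xFF for b in byte_msg[1::2])
-- 	total = (high << 8) + low
-- 	while (total >> 16) > 0:
-- 		total = (total & 0xFFFF) + (total >> 16)
-- 	return ~total & 0xFFFF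
-- ===== Notes on version B (the rewrite author's own statement) =====
-- stated objective: idiomatic
-- what changed: Replaced A's index-and-length-driven while-loop that builds 16-bit words byte-pair by byte-pair (plus a trailing-byte if) with two strided-slice byte sums (byte_msg[0::2] and byte_msg[1::2]) combined once as (high << 8) + low before the same carry fold.
import Mathlib
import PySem

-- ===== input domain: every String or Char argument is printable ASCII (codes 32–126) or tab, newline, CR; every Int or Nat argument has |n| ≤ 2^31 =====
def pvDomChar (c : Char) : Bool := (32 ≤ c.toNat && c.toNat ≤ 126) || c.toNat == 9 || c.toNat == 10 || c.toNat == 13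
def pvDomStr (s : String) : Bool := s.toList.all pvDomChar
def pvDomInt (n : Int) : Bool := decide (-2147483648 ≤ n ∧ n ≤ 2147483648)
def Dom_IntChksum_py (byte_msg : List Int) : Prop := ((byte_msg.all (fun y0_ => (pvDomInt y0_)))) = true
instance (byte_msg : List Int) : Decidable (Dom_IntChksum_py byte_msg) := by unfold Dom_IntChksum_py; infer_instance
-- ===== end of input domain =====

-- B replaces A's index-driven 16-bit-word-building while-loop by two strided-slice byte sums
-- combined once (idiomatic decomposition); return values proven equal for ALL inputs.

-- ===== PORT A =====
-- the final carry-folding while-loop: while (total >> 16) > 0: total = (total & 0xFFFF) + (total >> 16)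
def pvCarryA (total : Int) : Int :=
  if 0 < total >>> (16:Nat) then
    pvCarryA (PySem.Int.band total 0xFFFF + total >>> (16:Nat))
  else total
termination_by total.toNat
decreasing_by
  have h16 : total >>> (16:Nat) = total / 65536 := by
    rw [Int.shiftRight_eq_div_pow]; norm_num
  simp only [h16] at *
  have hnn : 0 ≤ total := by omega
  rw [PySem.Int.band_of_nonneg hnn (by norm_num)]
  have hm : total.toNat &&& (0xFFFF:Int).toNat = total.toNat % 65536 := by
    have he : ((0xFFFF:Int).toNat) = 2 ^ 16 - 1 := rfl
    rw [he, Nat.and_two_pow_sub_one_eq_mod]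
  rw [hm]
  omega

-- the main while-loop: consumes two bytes per step, then the trailing 'if length > 0' byte
def pvPairLoop : List Int → Int → Int
  | a :: b :: rest, total =>
      pvPairLoop rest (total + (PySem.Int.band (b <<< (8:Nat)) 0xFF00 + PySem.Int.band a 0xFF))
  | [a], total => total + PySem.Int.band a 0xFF
  | [], total => total

def IntChksum_py (byte_msg : List Int) : Int :=
  PySem.Int.band (Int.not (pvCarryA (pvPairLoop byte_msg 0))) 0xFFFF

-- ===== PORT B =====
-- hand ports of the slices byte_msg[0::2] / byte_msg[1::2] (exact: every 2nd element from 0 / 1)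
def pvEvens : List Int → List Int
  | [] => []
  | [a] => [a]
  | a :: _ :: rest => a :: pvEvens rest

def pvOdds : List Int → List Int
  | [] => []
  | [_] => []
  | _ :: b :: rest => b :: pvOdds rest

-- same carry-folding while-loop as in Source B
def pvCarryB (total : Int) : Int :=
  if 0 < total >>> (16:Nat) then
    pvCarryB (PySem.Int.band total 0xFFFF + total >>> (16:Nat))
  else total
termination_by total.toNat
decreasing_by
  have h16 : total >>> (16:Nat) = total / 65536 := by
    rw [Int.shiftRight_eq_div_pow]; norm_num
  simp only [h16] at *
  have hnn : 0 ≤ total := by omega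
  rw [PySem.Int.band_of_nonneg hnn (by norm_num)]
  have hm : total.toNat &&& (0xFFFF:Int).toNat = total.toNat % 65536 := by
    have he : ((0xFFFF:Int).toNat) = 2 ^ 16 - 1 := rfl
    rw [he, Nat.and_two_pow_sub_one_eq_mod]
  rw [hm]
  omega

def IntChksum_py_alt (byte_msg : List Int) : Int :=
  let low := (pvEvens byte_msg).foldl (fun s b => s + PySem.Int.band b 0xFF) 0
  let high := (pvOdds byte_msg).foldl (fun s b => s + PySem.Int.band b 0xFF) 0
  let total := (high <<< (8:Nat)) + low
  PySem.Int.band (Int.not (pvCarryB total)) 0xFFFF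

-- ===== PRECONDITION & SPEC =====
def Spec_IntChksum_py (byte_msg : List Int) (out : Int) : Prop := out = IntChksum_py_alt byte_msg
instance (byte_msg : List Int) (out : Int) : Decidable (Spec_IntChksum_py byte_msg out) := by unfold Spec_IntChksum_py; infer_instance

-- ===== CLAIM (what is proved, stated in full; the proofs are below) =====
def Claim_equal_IntChksum_py : Prop := ∀ (byte_msg : List Int), Dom_IntChksum_py byte_msg → Spec_IntChksum_py byte_msg (IntChksum_py byte_msg)

-- ===== LEMMAS AND PROOFS =====

-- Nat core of the mask identity
theorem pv_natmask (n : Nat) : n &&& 65280 = (n / 256 &&& 255) * 256 := by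
  have h : (n / 256 &&& 255) * 256 = (n / 256 &&& 255) <<< (8:Nat) := by
    rw [Nat.shiftLeft_eq]
  rw [h]
  apply Nat.eq_of_testBit_eq
  intro i
  rcases Nat.lt_or_ge i 8 with hi | hi
  · have h0 : Nat.testBit 65280 i = false := by
      interval_cases i <;> decide
    simp [Nat.testBit_and, Nat.testBit_shiftLeft, h0, Nat.not_le.mpr hi]
  · have hd : (n / 256).testBit (i - 8) = n.testBit i := by
      have h2 : (256 : Nat) = 2 ^ 8 := by norm_num
      rw [h2, Nat.testBit_div_two_pow]
      congr 1; omega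
    have h255 : Nat.testBit 65280 i = Nat.testBit 255 (i - 8) := by
      rcases Nat.lt_or_ge i 16 with hh | hh
      · interval_cases i <;> decide
      · have e1 : Nat.testBit 65280 i = false := Nat.testBit_lt_two_pow
          (by calc (65280:Nat) < 2 ^ 16 := by norm_num
                _ ≤ 2 ^ i := Nat.pow_le_pow_right (by norm_num) hh)
        have e2 : Nat.testBit 255 (i - 8) = false := Nat.testBit_lt_two_pow
          (by calc (255:Nat) < 2 ^ 8 := by norm_num
                _ ≤ 2 ^ (i - 8) := Nat.pow_le_pow_right (by norm_num) (by omega))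
        rw [e1, e2]
    simp [Nat.testBit_and, Nat.testBit_shiftLeft, hi, h255, hd]

-- ((x << 8) & 0xFF00) = (x & 0xFF) * 256, for every Int (Python two's-complement semantics)
theorem pv_bandmask (x : Int) : PySem.Int.band (x <<< (8:Nat)) 0xFF00 = PySem.Int.band x 0xFF * 256 := by
  have hs : x <<< (8:Nat) = x * 256 := by rw [Int.shiftLeft_eq]; norm_num
  rw [hs]
  by_cases hx : 0 ≤ x
  · rw [PySem.Int.band_of_nonneg (by positivity) (by norm_num),
        PySem.Int.band_of_nonneg hx (by norm_num)]
    have ht : (x * 256).toNat = x.toNat * 256 := by omega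
    have h1 : ((0xFF00:Int)).toNat = 65280 := rfl
    have h2 : ((0xFF:Int)).toNat = 255 := rfl
    rw [ht, h1, h2, pv_natmask]
    have : x.toNat * 256 / 256 = x.toNat := by omega
    rw [this]
    push_cast; ring
  · have hx256 : ¬ (0 ≤ x * 256) := by omega
    have hxneg : ¬ (0 ≤ x) := by omega
    simp only [PySem.Int.band, if_neg hx256, if_neg hxneg, if_pos (by norm_num : (0:Int) ≤ 0xFF00),
      if_pos (by norm_num : (0:Int) ≤ 0xFF)]
    have hm : (-(x * 256) - 1).toNat = 256 * (-x - 1).toNat + 255 := by omega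
    have h1 : ((0xFF00:Int)).toNat = 65280 := rfl
    have h2 : ((0xFF:Int)).toNat = 255 := rfl
    rw [hm, h1, h2]
    set m := (-x - 1).toNat with hmdef
    have hand : 65280 &&& (256 * m + 255) = (m &&& 255) * 256 := by
      rw [Nat.and_comm, pv_natmask]
      have : (256 * m + 255) / 256 = m := by omega
      rw [this]
    rw [hand]
    have hle1 : m &&& 255 ≤ 255 := Nat.and_le_right
    have hle2 : 255 &&& m ≤ 255 := Nat.and_le_left
    have hcomm : (255 &&& m) = (m &&& 255) := Nat.and_comm _ _
    omega

-- shifting the accumulator out of a masked-byte fold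
theorem pv_foldl_band (l : List Int) (s : Int) :
    l.foldl (fun s b => s + PySem.Int.band b 0xFF) s
      = s + (l.map (fun b => PySem.Int.band b 0xFF)).sum := by
  induction l generalizing s with
  | nil => simp
  | cons a t ih => simp [List.foldl_cons, ih]; ring

-- A's word-building loop equals accumulator + low-byte sum + 256 * high-byte sum
theorem pv_pairLoop_eq (xs : List Int) (t : Int) :
    pvPairLoop xs t
      = t + ((pvOdds xs).map (fun b => PySem.Int.band b 0xFF)).sum * 256
          + ((pvEvens xs).map (fun b => PySem.Int.band b 0xFF)).sum := by
  fun_induction pvPairLoop xs t with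
  | case1 a b rest total ih =>
      rw [ih]
      simp [pvEvens, pvOdds, pv_bandmask]
      ring
  | case2 a total => simp [pvEvens, pvOdds]
  | case3 total => simp [pvEvens, pvOdds]

-- the two identical carry-fold loops agree
theorem pv_carry_eq (t : Int) : pvCarryA t = pvCarryB t := by
  fun_induction pvCarryA t with
  | case1 total h ih => rw [pvCarryB, if_pos h]; exact ih
  | case2 total h => rw [pvCarryB, if_neg h]

-- ===== VERDICT (by name: the statement is the Claim_ definition above) =====
theorem IntChksum_py_spec : Claim_equal_IntChksum_py := by
  intro byte_msg _
  show IntChksum_py byte_msg = IntChksum_py_alt byte_msg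
  simp only [IntChksum_py, IntChksum_py_alt, pv_carry_eq, pv_pairLoop_eq, pv_foldl_band,
    Int.shiftLeft_eq]
  norm_num
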